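-- pv_equiv track=rewrite | github.com/AlexMarticus/AiSD_labs | lab_3/task2.py | block_sort
-- ===== SOURCE A (Python) =====
-- def block_sort(nums):
--     if len(nums)<2 or min(nums)==max(nums): return nums
--     arr = [[], [], [], []]
--     for i in nums:
--         if 0<=i<25: arr[0].append(i)
--         if 25<=i<50: arr[1].append(i)
--         if 50 <= i < 75: arr[2].append(i)
--         if 75<= i <=100: arr[3].append(i)
--
--     sort_nums = sorted(arr[0])+sorted(arr[1]+sorted(arr[2])+sorted(arr[3]))
--     return sort_nums
-- ===== SOURCE B (Python) =====
-- def block_sort(nums):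
--     if len(nums) < 2 or min(nums) == max(nums):
--         return nums
--     counts = [0] * 101
--     for x in nums:
--         if 0 <= x <= 100:
--             counts[x] += 1
--     out = []
--     for v in range(101):
--         out.extend([v] * counts[v])
--     return out
-- ===== Notes on version B (the rewrite author's own statement) =====
-- stated objective: alternative
-- what changed: Replaces the four-bucket partition plus comparison sorts with a single-pass counting sort over the fixed value range 0..100 (same early exit for len<2 or min==max); asymptotically O(n) but not measurably faster than C-coded sorted().
import Mathlib
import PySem

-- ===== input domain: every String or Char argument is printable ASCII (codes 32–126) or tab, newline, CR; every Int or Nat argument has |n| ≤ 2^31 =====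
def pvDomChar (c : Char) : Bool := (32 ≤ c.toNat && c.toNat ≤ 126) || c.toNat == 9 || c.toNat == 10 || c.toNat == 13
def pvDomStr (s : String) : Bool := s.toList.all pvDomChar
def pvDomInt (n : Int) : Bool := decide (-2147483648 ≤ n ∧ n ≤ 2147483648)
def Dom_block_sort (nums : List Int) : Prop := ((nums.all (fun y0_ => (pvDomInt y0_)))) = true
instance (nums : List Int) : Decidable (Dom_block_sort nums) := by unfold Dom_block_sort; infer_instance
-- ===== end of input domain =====

-- B replaces A's four-bucket partition plus comparison sorts by a counting sort over the fixed range 0..100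
-- (alternative algorithm; same early exit for len<2 or min==max; out-of-range values are dropped by both).

-- ===== PORT A =====
-- loop body of A's bucket loop (the four independent range tests, in A's order)
def stepA (s : List Int × List Int × List Int × List Int) (i : Int) : List Int × List Int × List Int × List Int :=
  let s := if 0 ≤ i ∧ i < 25 then (s.1 ++ [i], s.2.1, s.2.2.1, s.2.2.2) else s
  let s := if 25 ≤ i ∧ i < 50 then (s.1, s.2.1 ++ [i], s.2.2.1, s.2.2.2) else s
  let s := if 50 ≤ i ∧ i < 75 then (s.1, s.2.1, s.2.2.1 ++ [i], s.2.2.2) else s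
  let s := if 75 ≤ i ∧ i ≤ 100 then (s.1, s.2.1, s.2.2.1, s.2.2.2 ++ [i]) else s
  s

def block_sort (nums : List Int) : List Int :=
  if nums.length < 2 then nums
  else if PySem.List.min? nums (fun x => x) = PySem.List.max? nums (fun x => x) then nums
  else
    let arr := nums.foldl stepA ([], [], [], [])
    PySem.List.sorted arr.1 (fun x => x) false ++
      PySem.List.sorted (arr.2.1 ++ PySem.List.sorted arr.2.2.1 (fun x => x) false
        ++ PySem.List.sorted arr.2.2.2 (fun x => x) false) (fun x => x) false

-- ===== PORT B =====
-- loop body of B's counting loop: counts[x] += 1 for in-range x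
def stepB (c : List Int) (x : Int) : List Int :=
  if 0 ≤ x ∧ x ≤ 100 then c.set x.toNat (c.getD x.toNat 0 + 1) else c

def block_sort_alt (nums : List Int) : List Int :=
  if nums.length < 2 then nums
  else if PySem.List.min? nums (fun x => x) = PySem.List.max? nums (fun x => x) then nums
  else
    let counts := nums.foldl stepB (List.replicate 101 0)
    (PySem.List.pyRange 0 101 1).foldl
      (fun acc v => acc ++ List.replicate (counts.getD v.toNat 0).toNat v) []

-- ===== PRECONDITION & SPEC =====
def Spec_block_sort (nums : List Int) (out : List Int) : Prop := out = block_sort_alt nums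
instance (nums : List Int) (out : List Int) : Decidable (Spec_block_sort nums out) := by unfold Spec_block_sort; infer_instance

-- ===== CLAIM (what is proved, stated in full; the proofs are below) =====
def Claim_equal_block_sort : Prop := ∀ (nums : List Int), Dom_block_sort nums → Spec_block_sort nums (block_sort nums)

-- ===== LEMMAS AND PROOFS =====

theorem stepA_eq (a b c d : List Int) (i : Int) :
    stepA (a, b, c, d) i =
      (a ++ if 0 ≤ i ∧ i < 25 then [i] else [],
       b ++ if 25 ≤ i ∧ i < 50 then [i] else [],
       c ++ if 50 ≤ i ∧ i < 75 then [i] else [],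
       d ++ if 75 ≤ i ∧ i ≤ 100 then [i] else []) := by
  simp only [stepA]
  split_ifs <;> simp

theorem afold (nums : List Int) : ∀ (a b c d : List Int),
    nums.foldl stepA (a, b, c, d)
    = (a ++ nums.filter (fun i => decide (0 ≤ i ∧ i < 25)),
       b ++ nums.filter (fun i => decide (25 ≤ i ∧ i < 50)),
       c ++ nums.filter (fun i => decide (50 ≤ i ∧ i < 75)),
       d ++ nums.filter (fun i => decide (75 ≤ i ∧ i ≤ 100))) := by
  induction nums with
  | nil => simp
  | cons x t ih =>
    intro a b c d
    rw [List.foldl_cons, stepA_eq, ih]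
    by_cases h0 : 0 ≤ x ∧ x < 25 <;> by_cases h1 : 25 ≤ x ∧ x < 50 <;>
      by_cases h2 : 50 ≤ x ∧ x < 75 <;> by_cases h3 : 75 ≤ x ∧ x ≤ 100 <;>
      simp [h0, h1, h2, h3]

theorem stepB_len (c : List Int) (x : Int) : (stepB c x).length = c.length := by
  unfold stepB; split_ifs <;> simp

theorem bfold (nums : List Int) : ∀ (c : List Int), c.length = 101 → ∀ v : Nat, v < 101 →
    (nums.foldl stepB c).getD v 0
      = c.getD v 0 + ((nums.filter (fun x => decide (0 ≤ x ∧ x ≤ 100))).count (v : Int) : Int) := by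
  induction nums with
  | nil => intro c _ v _; simp
  | cons x t ih =>
    intro c hc v hv
    rw [List.foldl_cons]
    have hlen : (stepB c x).length = 101 := by rw [stepB_len, hc]
    rw [ih (stepB c x) hlen v hv]
    by_cases h : 0 ≤ x ∧ x ≤ 100
    · have hxlt : x.toNat < c.length := by omega
      by_cases hxv : x = (v : Int)
      · have hv' : x.toNat = v := by omega
        subst hv'
        rw [List.filter_cons_of_pos (by simpa using h), ← hxv, List.count_cons_self]
        simp only [stepB, if_pos h, List.getD_eq_getElem?_getD,
          List.getElem?_set_self hxlt, Option.getD_some]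
        push_cast
        ring
      · have hne : x.toNat ≠ v := by omega
        simp [stepB, h, List.getD, List.getElem?_set_ne hne, hxv]
    · have hxv : ¬ x = (v : Int) := by omega
      simp [stepB, h]

theorem flat_pairwise (l : List Int) (f : Int → Nat) (hl : l.Pairwise (· < ·)) :
    (l.flatMap (fun v => List.replicate (f v) v)).Pairwise (· ≤ ·) := by
  induction l with
  | nil => simp
  | cons x t ih =>
    rw [List.pairwise_cons] at hl
    rw [List.flatMap_cons, List.pairwise_append]
    refine ⟨List.pairwise_replicate.mpr (Or.inr le_rfl), ih hl.2, ?_⟩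
    intro a ha b hb
    rw [List.mem_replicate] at ha
    rw [List.mem_flatMap] at hb
    obtain ⟨y, hy, hby⟩ := hb
    rw [List.mem_replicate] at hby
    have := hl.1 y hy
    omega

theorem flat_count (l : List Int) (f : Int → Nat) (hl : l.Nodup) (w : Int) :
    (l.flatMap (fun v => List.replicate (f v) v)).count w = if w ∈ l then f w else 0 := by
  induction l with
  | nil => simp
  | cons x t ih =>
    rw [List.nodup_cons] at hl
    rw [List.flatMap_cons, List.count_append, ih hl.2, List.count_replicate]
    by_cases hwx : w = x
    · subst hwx; simp [hl.1]
    · simp [hwx, Ne.symm hwx, List.mem_cons]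

theorem count_filter' (a : Int) (p : Int → Bool) (l : List Int) :
    (l.filter p).count a = if p a then l.count a else 0 := by
  by_cases h : p a = true
  · rw [if_pos h, List.count_filter h]
  · rw [if_neg h, List.count_eq_zero]
    intro hmem
    exact h (List.of_mem_filter hmem)

theorem perm_four (nums : List Int) :
    (nums.filter (fun i => decide (0 ≤ i ∧ i < 25)) ++
      (nums.filter (fun i => decide (25 ≤ i ∧ i < 50)) ++
       nums.filter (fun i => decide (50 ≤ i ∧ i < 75)) ++
       nums.filter (fun i => decide (75 ≤ i ∧ i ≤ 100)))).Perm
    (nums.filter (fun x => decide (0 ≤ x ∧ x ≤ 100))) := by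
  apply List.perm_iff_count.mpr
  intro w
  simp only [List.count_append, count_filter', decide_eq_true_eq]
  split_ifs <;> omega

theorem bflat (counts : List Int) (nums : List Int) (hc : ∀ v : Nat, v < 101 →
      counts.getD v 0 = ((nums.filter (fun x => decide (0 ≤ x ∧ x ≤ 100))).count (v : Int) : Int)) :
    ((PySem.List.pyRange 0 101 1).flatMap
        (fun v => List.replicate (counts.getD v.toNat 0).toNat v)).Perm
      (nums.filter (fun x => decide (0 ≤ x ∧ x ≤ 100))) := by
  apply List.perm_iff_count.mpr
  intro w
  rw [flat_count _ _ (PySem.List.nodup_pyRange_one 0 101) w]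
  by_cases hw : w ∈ PySem.List.pyRange 0 101 1
  · rw [if_pos hw]
    rw [PySem.List.mem_pyRange_one] at hw
    have h1 : ((w.toNat : Int)) = w := by omega
    rw [hc w.toNat (by omega), h1]
    simp
  · rw [if_neg hw, PySem.List.mem_pyRange_one] at *
    symm
    rw [List.count_eq_zero]
    intro hmem
    have := List.of_mem_filter hmem
    simp only [decide_eq_true_eq] at this
    omega

-- ===== VERDICT (by name: the statement is the Claim_ definition above) =====
theorem block_sort_spec : Claim_equal_block_sort := by
  intro nums _
  unfold Spec_block_sort block_sort block_sort_alt
  by_cases hlen : nums.length < 2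
  · rw [if_pos hlen, if_pos hlen]
  · rw [if_neg hlen, if_neg hlen]
    by_cases hmm : PySem.List.min? nums (fun x => x) = PySem.List.max? nums (fun x => x)
    · rw [if_pos hmm, if_pos hmm]
    · rw [if_neg hmm, if_neg hmm]
      simp only [afold nums [] [] [] [], List.nil_append,
        PySem.List.foldl_append_eq_flatMap, List.nil_append]
      set f0 := nums.filter (fun i => decide (0 ≤ i ∧ i < 25)) with hf0
      set f1 := nums.filter (fun i => decide (25 ≤ i ∧ i < 50)) with hf1
      set f2 := nums.filter (fun i => decide (50 ≤ i ∧ i < 75)) with hf2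
      set f3 := nums.filter (fun i => decide (75 ≤ i ∧ i ≤ 100)) with hf3
      set F := nums.filter (fun x => decide (0 ≤ x ∧ x ≤ 100)) with hF
      set counts := nums.foldl stepB (List.replicate 101 0) with hcounts
      -- A's result is a permutation of F
      have hpermA : (PySem.List.sorted f0 (fun x => x) false ++
          PySem.List.sorted (f1 ++ PySem.List.sorted f2 (fun x => x) false
            ++ PySem.List.sorted f3 (fun x => x) false) (fun x => x) false).Perm F := by
        refine List.Perm.trans (List.Perm.append (PySem.List.sorted_perm _ _ _)
          (PySem.List.sorted_perm _ _ _)) ?_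
        refine List.Perm.trans (List.Perm.append_left f0 ?_) (perm_four nums)
        exact List.Perm.append (List.Perm.append_left f1 (PySem.List.sorted_perm _ _ _))
          (PySem.List.sorted_perm _ _ _)
      -- A's result is sorted
      have hpwA : (PySem.List.sorted f0 (fun x => x) false ++
          PySem.List.sorted (f1 ++ PySem.List.sorted f2 (fun x => x) false
            ++ PySem.List.sorted f3 (fun x => x) false) (fun x => x) false).Pairwise (· ≤ ·) := by
        rw [List.pairwise_append]
        refine ⟨PySem.List.sorted_pairwise _ _, PySem.List.sorted_pairwise _ _, ?_⟩
        intro a ha b hb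
        rw [PySem.List.mem_sorted] at ha hb
        have ha' : a < 25 := by
          have := List.of_mem_filter ha; simp only [decide_eq_true_eq] at this; omega
        have hb' : 25 ≤ b := by
          rcases List.mem_append.mp hb with h | h
          · rcases List.mem_append.mp h with h | h
            · have := List.of_mem_filter h; simp only [decide_eq_true_eq] at this; omega
            · rw [PySem.List.mem_sorted] at h
              have := List.of_mem_filter h; simp only [decide_eq_true_eq] at this; omega
          · rw [PySem.List.mem_sorted] at h
            have := List.of_mem_filter h; simp only [decide_eq_true_eq] at this; omega
        omega
      -- B's result is a permutation of F
      have hcount : ∀ v : Nat, v < 101 →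
          counts.getD v 0 = ((F.count (v : Int) : Int)) := by
        intro v hv
        rw [hcounts, bfold nums (List.replicate 101 0) (by simp) v hv]
        have hz : (List.replicate 101 (0 : Int)).getD v 0 = 0 := by
          rw [List.getD_eq_getElem?_getD, List.getElem?_replicate]
          simp [hv]
        rw [hz, zero_add]
      have hpermB := bflat counts nums hcount
      -- B's result is sorted
      have hpwB := flat_pairwise (PySem.List.pyRange 0 101 1)
        (fun v => (counts.getD v.toNat 0).toNat) (PySem.List.pairwise_lt_pyRange_one 0 101)
      exact PySem.List.eq_of_perm_of_pairwise_le_of_injective (fun x => x)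
        (fun _ _ h => h) (hpermA.trans hpermB.symm) hpwA hpwB
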